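-- pv_equiv track=rewrite | github.com/HKUST-KnowComp/DiscoPrompt | data_utils.py | post_process_arg1
-- ===== SOURCE A (Python) =====
-- CLAUSE_SEPARATOR_SET = set(list(".,:;?!~-"))
--
-- CHARACTER_SET = set(map(chr, range(97, 97 + 26))) | set(map(chr, range(65, 65 + 26)))
--
-- def post_process_arg1(arg1):
--     # capitalize the first character
--     i = 0
--     while i < len(arg1) and arg1[i] not in CHARACTER_SET:
--         i += 1
--
--     # remove separators
--     j = len(arg1)
--     while j - 1 >= 0 and arg1[j - 1] in CLAUSE_SEPARATOR_SET:
--         j -= 1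
--
--     k = min(i + 1, j)
--     arg1 = arg1[:k].upper() + arg1[k:j]
--
--     return arg1
-- ===== SOURCE B (Python) =====
-- CLAUSE_SEPARATOR_SET = set(list(".,:;?!~-"))
--
-- CHARACTER_SET = set(map(chr, range(97, 97 + 26))) | set(map(chr, range(65, 65 + 26)))
--
-- def post_process_arg1(arg1):
--     # One-pass state machine: separators are buffered in `pending`; a separator
--     # run that turns out to be trailing is simply never flushed, so no rstrip,
--     # slicing or index arithmetic is needed. `seen` marks that the first letter
--     # has already been uppercased.
--     out = []
--     pending = []
--     seen = False
--     for c in arg1: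
--         if c in CLAUSE_SEPARATOR_SET:
--             pending.append(c)
--         else:
--             out.extend(pending)
--             pending = []
--             if not seen and c in CHARACTER_SET:
--                 out.append(c.upper())
--                 seen = True
--             else:
--                 out.append(c)
--     return ''.join(out)
-- ===== Notes on version B (the rewrite author's own statement) =====
-- stated objective: alternative
-- what changed: A runs two index scans (first-letter index i, trailing-separator index j), clamps k = min(i+1, j) and rebuilds the string from slices with a prefix upper(); B is a single left-to-right pass with a state machine that buffers separator runs in a pending list (a run that turns out to be trailing is never flushed) and uppercases the first letter it meets, with no indices or slices at all.
import Mathlib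
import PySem

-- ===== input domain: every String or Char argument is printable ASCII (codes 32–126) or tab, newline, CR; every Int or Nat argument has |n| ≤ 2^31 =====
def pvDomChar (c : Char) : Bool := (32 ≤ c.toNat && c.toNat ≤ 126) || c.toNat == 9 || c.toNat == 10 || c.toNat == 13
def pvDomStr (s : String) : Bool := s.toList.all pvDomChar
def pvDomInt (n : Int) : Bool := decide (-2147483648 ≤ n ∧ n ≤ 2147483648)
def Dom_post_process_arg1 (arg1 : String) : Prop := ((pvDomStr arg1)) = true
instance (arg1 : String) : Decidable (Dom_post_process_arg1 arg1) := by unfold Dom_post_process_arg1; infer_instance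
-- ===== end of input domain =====

-- B replaces A's index arithmetic (two scan counters, min, slice reassembly with a prefix
-- upper()) by a single-pass state machine buffering separator runs; objective: alternative.

-- ===== PORT A =====
-- membership in CHARACTER_SET (the 52 ASCII letters)
def pvIsLetter (c : Char) : Bool :=
  (decide ('a' ≤ c) && decide (c ≤ 'z')) || (decide ('A' ≤ c) && decide (c ≤ 'Z'))

-- membership in CLAUSE_SEPARATOR_SET
def pvIsSep (c : Char) : Bool :=
  c == '.' || c == ',' || c == ':' || c == ';' || c == '?' || c == '!' || c == '~' || c == '-'

-- A's first while loop: i counts leading characters not in CHARACTER_SET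
def pvScanI : List Char → Nat
  | [] => 0
  | c :: rest => if pvIsLetter c then 0 else pvScanI rest + 1

-- A's second while loop walks j down from len while arg1[j-1] is a separator;
-- transcribed as counting the leading separators of the reversed character list (exact)
def pvTrailSeps : List Char → Nat
  | [] => 0
  | c :: rest => if pvIsSep c then pvTrailSeps rest + 1 else 0

def post_process_arg1 (arg1 : String) : String :=
  let l := arg1.toList
  let i := pvScanI l
  let j := l.length - pvTrailSeps l.reverse
  let k := min (i + 1) j
  -- arg1[:k].upper() + arg1[k:j]  (slices with in-range non-negative bounds; upper is PySem's)
  String.ofList (PySem.Chars.upper (PySem.Chars.slice l none (some (k : Int))) ++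
             PySem.Chars.slice l (some (k : Int)) (some (j : Int)))

-- ===== PORT B =====
-- B's loop body: state is (out, pending separator run, first-letter-seen flag)
def pvStepB (st : List Char × List Char × Bool) (c : Char) : List Char × List Char × Bool :=
  let (out, pending, seen) := st
  if pvIsSep c then (out, pending ++ [c], seen)
  else (out ++ pending ++ [if !seen && pvIsLetter c then PySem.Chars.upperChar c else c],
        [], seen || pvIsLetter c)

def post_process_arg1_alt (arg1 : String) : String :=
  String.ofList (arg1.toList.foldl pvStepB ([], [], false)).1

-- ===== PRECONDITION & SPEC =====
def Spec_post_process_arg1 (arg1 : String) (out : String) : Prop := out = post_process_arg1_alt arg1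
instance (arg1 : String) (out : String) : Decidable (Spec_post_process_arg1 arg1 out) := by unfold Spec_post_process_arg1; infer_instance

-- ===== CLAIM (what is proved, stated in full; the proofs are below) =====
def Claim_equal_post_process_arg1 : Prop := ∀ (arg1 : String), Dom_post_process_arg1 arg1 → Spec_post_process_arg1 arg1 (post_process_arg1 arg1)

-- ===== LEMMAS AND PROOFS =====

-- proof-side restatement of B's loop as a forward recursion
def pvLoop : List Char → List Char → Bool → List Char
  | [], _, _ => []
  | c :: rest, pending, seen =>
      if pvIsSep c then pvLoop rest (pending ++ [c]) seen
      else pending ++ [if !seen && pvIsLetter c then PySem.Chars.upperChar c else c] ++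
           pvLoop rest [] (seen || pvIsLetter c)

-- proof-side: rstrip of separators and uppercase-first-letter
def pvRstripSeps (l : List Char) : List Char := (l.reverse.dropWhile pvIsSep).reverse

def pvUpperFirst : List Char → List Char
  | [] => []
  | c :: rest =>
      if pvIsLetter c then PySem.Chars.upperChar c :: rest else c :: pvUpperFirst rest

theorem sep_not_letter {c : Char} (h : pvIsSep c = true) : pvIsLetter c = false := by
  simp only [pvIsSep, Bool.or_eq_true, beq_iff_eq] at h
  rcases h with ((((((h|h)|h)|h)|h)|h)|h)|h <;> subst h <;> decide

theorem foldl_stepB (l : List Char) (out pending : List Char) (seen : Bool) :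
    (l.foldl pvStepB (out, pending, seen)).1 = out ++ pvLoop l pending seen := by
  induction l generalizing out pending seen with
  | nil => simp [pvLoop]
  | cons c rest ih =>
      by_cases h : pvIsSep c = true
      · simp [pvStepB, pvLoop, h, ih]
      · simp only [Bool.not_eq_true] at h
        simp [pvStepB, pvLoop, h, ih]

theorem pvLoop_pending (l : List Char) (pending : List Char) (seen : Bool) :
    pvLoop l pending seen =
      if l.all pvIsSep then [] else pending ++ pvLoop l [] seen := by
  induction l generalizing pending with
  | nil => simp [pvLoop]
  | cons c rest ih =>
      by_cases h : pvIsSep c = true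
      · rw [show pvLoop (c :: rest) pending seen = pvLoop rest (pending ++ [c]) seen from by
              simp [pvLoop, h],
            show pvLoop (c :: rest) [] seen = pvLoop rest [c] seen from by
              simp [pvLoop, h],
            ih (pending ++ [c]), ih [c]]
        by_cases hr : rest.all pvIsSep
        · simp [List.all_cons, h, hr]
        · simp [List.all_cons, h, hr]
      · simp only [Bool.not_eq_true] at h
        simp [pvLoop, h, List.all_cons]

theorem rstrip_cons (c : Char) (rest : List Char) :
    pvRstripSeps (c :: rest) =
      if (c :: rest).all pvIsSep then [] else c :: pvRstripSeps rest := by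
  unfold pvRstripSeps
  rw [List.reverse_cons, List.dropWhile_append]
  by_cases hrest : rest.reverse.dropWhile pvIsSep = []
  · have hra : rest.all pvIsSep = true := List.all_eq_true.mpr
      (fun x hx => List.dropWhile_eq_nil_iff.mp hrest x (List.mem_reverse.mpr hx))
    by_cases hc : pvIsSep c = true
    · simp [hrest, hc, List.all_cons, hra]
    · simp only [Bool.not_eq_true] at hc
      simp [hrest, hc, List.all_cons, hra]
  · have hnall : (c :: rest).all pvIsSep = false := by
      rw [Bool.eq_false_iff]
      intro hall
      exact hrest (List.dropWhile_eq_nil_iff.mpr (fun x hx =>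
        List.all_eq_true.mp hall x (by simp [List.mem_reverse.mp hx])))
    simp [hrest, hnall]

theorem pvLoop_true (l : List Char) : pvLoop l [] true = pvRstripSeps l := by
  induction l with
  | nil => rfl
  | cons c rest ih =>
      rw [rstrip_cons]
      by_cases h : pvIsSep c = true
      · rw [show pvLoop (c :: rest) [] true = pvLoop rest [c] true from by simp [pvLoop, h],
            pvLoop_pending, ih]
        by_cases hr : rest.all pvIsSep
        · simp [List.all_cons, h, hr]
        · simp [List.all_cons, h, hr]
      · simp only [Bool.not_eq_true] at h
        simp [pvLoop, h, List.all_cons, ih]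

theorem pvLoop_false (l : List Char) :
    pvLoop l [] false = pvUpperFirst (pvRstripSeps l) := by
  induction l with
  | nil => rfl
  | cons c rest ih =>
      rw [rstrip_cons]
      by_cases h : pvIsSep c = true
      · rw [show pvLoop (c :: rest) [] false = pvLoop rest [c] false from by simp [pvLoop, h],
            pvLoop_pending, ih]
        by_cases hr : rest.all pvIsSep
        · simp [List.all_cons, h, hr, pvUpperFirst]
        · simp [List.all_cons, h, hr, pvUpperFirst, sep_not_letter h]
      · simp only [Bool.not_eq_true] at h
        by_cases hl : pvIsLetter c = true
        · simp [pvLoop, h, hl, List.all_cons, pvUpperFirst, pvLoop_true]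
        · simp only [Bool.not_eq_true] at hl
          simp [pvLoop, h, hl, List.all_cons, pvUpperFirst, ih]

theorem upperChar_of_not_letter {c : Char} (h : pvIsLetter c = false) :
    PySem.Chars.upperChar c = c := by
  unfold PySem.Chars.upperChar PySem.Chars.islower
  simp only [pvIsLetter, Bool.or_eq_false_iff, Bool.and_eq_false_iff,
    decide_eq_false_iff_not] at h
  split_ifs with hlow
  · simp only [Bool.and_eq_true, decide_eq_true_eq] at hlow
    exact absurd hlow.1 (h.1.resolve_right (fun h2 => h2 hlow.2))
  · rfl

theorem trailSeps_eq (r : List Char) : pvTrailSeps r = (r.takeWhile pvIsSep).length := by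
  induction r with
  | nil => rfl
  | cons c rest ih =>
      by_cases h : pvIsSep c = true
      · simp [pvTrailSeps, h, ih]
      · simp only [Bool.not_eq_true] at h
        simp [pvTrailSeps, h]

theorem scanI_append_of_letter {s : List Char} (r : List Char)
    (h : ∃ c ∈ s, pvIsLetter c = true) :
    pvScanI (s ++ r) = pvScanI s ∧ pvScanI s < s.length := by
  induction s with
  | nil => simp at h
  | cons c rest ih =>
      by_cases hc : pvIsLetter c = true
      · simp [pvScanI, hc]
      · obtain ⟨d, hd, hdl⟩ := h
        rcases List.mem_cons.mp hd with rfl | hd'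
        · exact absurd hdl hc
        · obtain ⟨h1, h2⟩ := ih ⟨d, hd', hdl⟩
          simp [pvScanI, hc, h1]
          omega

theorem scanI_append_of_no_letter {s : List Char} (r : List Char)
    (h : ∀ c ∈ s, pvIsLetter c = false) :
    pvScanI (s ++ r) = s.length + pvScanI r := by
  induction s with
  | nil => simp
  | cons c rest ih =>
      have hc := h c (by simp)
      simp [pvScanI, hc, ih (fun d hd => h d (by simp [hd]))]
      omega

theorem core_letter {s : List Char} (h : ∃ c ∈ s, pvIsLetter c = true) :
    (s.take (pvScanI s + 1)).map PySem.Chars.upperChar ++ s.drop (pvScanI s + 1) =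
      pvUpperFirst s := by
  induction s with
  | nil => simp at h
  | cons c rest ih =>
      by_cases hc : pvIsLetter c = true
      · simp [pvScanI, pvUpperFirst, hc]
      · simp only [Bool.not_eq_true] at hc
        obtain ⟨d, hd, hdl⟩ := h
        rcases List.mem_cons.mp hd with rfl | hd'
        · rw [hc] at hdl; exact absurd hdl (by simp)
        · rw [show pvScanI (c :: rest) = pvScanI rest + 1 from by simp [pvScanI, hc],
              show pvUpperFirst (c :: rest) = c :: pvUpperFirst rest from by
                simp [pvUpperFirst, hc]]
          simp only [List.take_succ_cons, List.drop_succ_cons, List.map_cons,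
            upperChar_of_not_letter hc, List.cons_append]
          exact congrArg (c :: ·) (ih ⟨d, hd', hdl⟩)

theorem core_no_letter {s : List Char} (h : ∀ c ∈ s, pvIsLetter c = false) :
    s.map PySem.Chars.upperChar = pvUpperFirst s := by
  induction s with
  | nil => rfl
  | cons c rest ih =>
      have hc := h c (by simp)
      simp [pvUpperFirst, hc, upperChar_of_not_letter hc,
        ih (fun d hd => h d (by simp [hd]))]

theorem main_lists (l : List Char) :
    PySem.Chars.upper (PySem.Chars.slice l none
        (some ((min (pvScanI l + 1) (l.length - pvTrailSeps l.reverse) : Nat) : Int))) ++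
      PySem.Chars.slice l (some ((min (pvScanI l + 1) (l.length - pvTrailSeps l.reverse) : Nat) : Int))
        (some ((l.length - pvTrailSeps l.reverse : Nat) : Int)) =
      pvUpperFirst (pvRstripSeps l) := by
  set u := (l.reverse.dropWhile pvIsSep).reverse with hu
  set v := (l.reverse.takeWhile pvIsSep).reverse with hv
  have hl : l = u ++ v := by
    rw [hu, hv, ← List.reverse_append, List.takeWhile_append_dropWhile, List.reverse_reverse]
  have hvlen : pvTrailSeps l.reverse = v.length := by
    simp [trailSeps_eq, hv]
  have hj : l.length - pvTrailSeps l.reverse = u.length := by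
    rw [hvlen, hl]; simp
  rw [hj]
  rw [PySem.Chars.slice_eq_listSlice, PySem.Chars.slice_eq_listSlice,
      PySem.List.slice_to l (Int.natCast_nonneg _),
      PySem.List.slice_toNat l (Int.natCast_nonneg _) (Int.natCast_nonneg _)]
  simp only [Int.toNat_natCast]
  have hup : ∀ xs : List Char, PySem.Chars.upper xs = xs.map PySem.Chars.upperChar := by
    intro xs; simp [PySem.Chars.upper]
  rw [hup]
  have hru : pvRstripSeps l = u := by rw [hu]; rfl
  rw [hru]
  by_cases hlet : ∃ c ∈ u, pvIsLetter c = true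
  · obtain ⟨h1, h2⟩ := scanI_append_of_letter (s := u) v hlet
    have hil : pvScanI l = pvScanI u := by rw [hl]; exact h1
    have hk : min (pvScanI l + 1) u.length = pvScanI u + 1 := by
      rw [hil]; omega
    rw [hk]
    have ht : l.take (pvScanI u + 1) = u.take (pvScanI u + 1) := by
      rw [hl, List.take_append_of_le_length (by omega)]
    have hd : l.drop (pvScanI u + 1) = u.drop (pvScanI u + 1) ++ v := by
      rw [hl, List.drop_append_of_le_length (by omega)]
    rw [ht, hd]
    have hlen2 : u.length - (pvScanI u + 1) = (u.drop (pvScanI u + 1)).length := by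
      simp
    rw [hlen2, List.take_left]
    exact core_letter hlet
  · have hnl : ∀ c ∈ u, pvIsLetter c = false := by
      intro c hc
      by_contra hcc
      exact hlet ⟨c, hc, by simpa using hcc⟩
    have hil : pvScanI l = u.length + pvScanI v := by
      rw [hl]; exact scanI_append_of_no_letter v hnl
    have hk : min (pvScanI l + 1) u.length = u.length := by omega
    rw [hk, hl, List.take_left, List.drop_left]
    simp only [Nat.sub_self, List.take_zero, List.append_nil]
    exact core_no_letter hnl

-- ===== VERDICT (by name: the statement is the Claim_ definition above) =====
theorem post_process_arg1_spec : Claim_equal_post_process_arg1 := by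
  intro arg1 _
  unfold Spec_post_process_arg1 post_process_arg1 post_process_arg1_alt
  rw [foldl_stepB, List.nil_append, pvLoop_false]
  exact congrArg String.ofList (main_lists arg1.toList)
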